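-- pv_equiv track=rewrite | github.com/parallelno/Vector06c | Vector06c_Dev/_Projects/GameNoname/scripts/common.py | remove_double_slashes
-- ===== SOURCE A (Python) =====
-- def remove_double_slashes(path):
-- 	res = ""
-- 	doubledSlashe = False
-- 	for char in path:
-- 		if char != '\\':
-- 			res += char
-- 			doubledSlashe = False
-- 		else:
-- 			if doubledSlashe == False:
-- 				res += char
-- 				doubledSlashe = True
-- 			else:
-- 				doubledSlashe = False
-- 	return res
-- ===== SOURCE B (Python) =====
-- def remove_double_slashes(path):
--     parts = []
--     i = 0
--     n = len(path)
--     while i < n: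
--         j = i
--         while j < n and path[j] == path[i]:
--             j += 1
--         run = j - i
--         if path[i] == '\\':
--             parts.append('\\' * ((run + 1) // 2))
--         else:
--             parts.append(path[i] * run)
--         i = j
--     return ''.join(parts)
-- ===== Notes on version B (the rewrite author's own statement) =====
-- stated objective: alternative
-- what changed: B walks maximal runs of identical characters (run-length decomposition) and emits ceil(n/2) backslashes per backslash run, instead of A's per-character toggle flag.
import Mathlib
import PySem

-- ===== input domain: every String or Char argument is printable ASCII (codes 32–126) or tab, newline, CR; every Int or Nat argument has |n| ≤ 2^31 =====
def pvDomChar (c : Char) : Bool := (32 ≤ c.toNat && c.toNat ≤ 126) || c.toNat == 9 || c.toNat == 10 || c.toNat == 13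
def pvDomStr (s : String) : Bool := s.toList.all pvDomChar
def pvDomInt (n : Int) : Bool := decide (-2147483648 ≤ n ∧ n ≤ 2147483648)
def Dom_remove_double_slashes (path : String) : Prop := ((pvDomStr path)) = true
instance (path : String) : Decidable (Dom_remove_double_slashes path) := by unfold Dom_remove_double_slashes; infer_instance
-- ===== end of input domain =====

-- B replaces A's per-character toggle flag by a run-length walk over maximal runs of
-- identical characters, emitting ceil(n/2) backslashes per backslash run (objective: alternative).

-- ===== PORT A =====
-- loop body of A: state = (res, doubledSlashe)
def pvStepA (st : List Char × Bool) (c : Char) : List Char × Bool :=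
  if c ≠ '\\' then (st.1 ++ [c], false)
  else if st.2 = false then (st.1 ++ [c], true)
  else (st.1, false)

def remove_double_slashes (path : String) : String :=
  String.mk (path.toList.foldl pvStepA ([], false)).1

-- ===== PORT B =====
-- one iteration of B's outer while loop: take the maximal run of the head character,
-- emit its chunk, continue after the run
def pvRuns : List Char → List Char
  | [] => []
  | c :: rest =>
      let run := rest.takeWhile (· == c)
      (if c = '\\' then List.replicate (((run.length + 1) + 1) / 2) '\\'
       else c :: run) ++ pvRuns (rest.dropWhile (· == c))
termination_by l => l.length
decreasing_by
  simp only [List.length_cons]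
  exact Nat.lt_succ_of_le (List.length_dropWhile_le _ _)

def remove_double_slashes_alt (path : String) : String :=
  String.mk (pvRuns path.toList)

-- ===== PRECONDITION & SPEC =====
def Spec_remove_double_slashes (path : String) (out : String) : Prop := out = remove_double_slashes_alt path
instance (path : String) (out : String) : Decidable (Spec_remove_double_slashes path out) := by unfold Spec_remove_double_slashes; infer_instance

-- ===== CLAIM (what is proved, stated in full; the proofs are below) =====
def Claim_equal_remove_double_slashes : Prop := ∀ (path : String), Dom_remove_double_slashes path → Spec_remove_double_slashes path (remove_double_slashes path)

-- ===== LEMMAS AND PROOFS =====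

-- A's loop, rewritten as a forward recursion on (flag, remaining input)
def goA : Bool → List Char → List Char
  | _, [] => []
  | b, c :: rest =>
      if c ≠ '\\' then c :: goA false rest
      else if b = false then c :: goA true rest
      else goA false rest

theorem foldA_eq (l : List Char) : ∀ (acc : List Char) (b : Bool),
    (l.foldl pvStepA (acc, b)).1 = acc ++ goA b l := by
  induction l with
  | nil => intro acc b; simp [goA]
  | cons c rest ih =>
      intro acc b
      by_cases hc : c = '\\'
      · subst hc
        cases b with
        | false => simp [pvStepA, goA, ih]
        | true => simp [pvStepA, goA, ih]
      · simp [pvStepA, goA, hc, ih]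

-- a run of non-backslash characters passes through unchanged and resets the flag
theorem goA_non_bs_run (r : List Char) (hr : ∀ d ∈ r, d ≠ '\\') (t : List Char) :
    goA false (r ++ t) = r ++ goA false t := by
  induction r with
  | nil => rfl
  | cons d r ih =>
      have hd : d ≠ '\\' := hr d (by simp)
      simp only [List.cons_append, goA, if_pos hd]
      rw [ih (fun x hx => hr x (by simp [hx]))]

-- when the next character is not a backslash (or input ends), the flag is irrelevant
theorem goA_flag_irrel (b : Bool) (t : List Char) (ht : ∀ d, t.head? = some d → d ≠ '\\') :
    goA b t = goA false t := by
  cases t with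
  | nil => rfl
  | cons d t =>
      have hd : d ≠ '\\' := ht d rfl
      simp [goA, hd]

-- a run of n backslashes keeps ceil(n/2) of them
theorem goA_bs_run (t : List Char) (ht : ∀ d, t.head? = some d → d ≠ '\\') :
    ∀ n, goA false (List.replicate n '\\' ++ t)
        = List.replicate ((n + 1) / 2) '\\' ++ goA false t := by
  intro n
  induction n using Nat.twoStepInduction with
  | zero => simp
  | one =>
      simp only [List.replicate_one, List.cons_append, List.nil_append, goA, reduceIte]
      simp [goA_flag_irrel true t ht]
  | more n ih _ =>
      have h2 : (n + 2 + 1) / 2 = (n + 1) / 2 + 1 := by omega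
      simp only [List.replicate_succ, List.cons_append, goA, reduceIte, h2]
      rw [ih]
      simp

theorem head?_dropWhile_ne (p : Char → Bool) (l : List Char) :
    ∀ d, ((l.dropWhile p).head? = some d) → p d = false := by
  induction l with
  | nil => intro d h; simp at h
  | cons c l ih =>
      intro d h
      by_cases hc : p c
      · exact ih d (by simpa [List.dropWhile, hc] using h)
      · simp [List.dropWhile, hc] at h
        simpa [← h] using hc

theorem pvRuns_eq_goA (l : List Char) : pvRuns l = goA false l := by
  induction l using pvRuns.induct with
  | case1 => simp [pvRuns, goA]
  | case2 c rest ih =>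
      have hsplit : rest = rest.takeWhile (· == c) ++ rest.dropWhile (· == c) :=
        (List.takeWhile_append_dropWhile).symm
      have hhead : ∀ d, ((rest.dropWhile (· == c)).head? = some d) → d ≠ c := by
        intro d h
        have := head?_dropWhile_ne (· == c) rest d h
        simpa using this
      by_cases hc : c = '\\'
      · subst hc
        have hrun : rest.takeWhile (· == '\\') = List.replicate (rest.takeWhile (· == '\\')).length '\\' := by
          apply List.eq_replicate_of_mem
          intro d hd
          have := List.mem_takeWhile_imp hd
          simpa using this
        rw [pvRuns, if_pos rfl, ih]
        conv_rhs => rw [show ('\\' :: rest) = List.replicate ((rest.takeWhile (· == '\\')).length + 1) '\\' ++ rest.dropWhile (· == '\\') by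
          rw [List.replicate_succ, List.cons_append]
          congr 1
          conv_lhs => rw [hsplit]
          rw [← hrun]]
        rw [goA_bs_run _ hhead]
      · have hrunne : ∀ d ∈ c :: rest.takeWhile (· == c), d ≠ '\\' := by
          intro d hd
          rw [List.mem_cons] at hd
          rcases hd with rfl | h
          · exact hc
          · have := List.mem_takeWhile_imp h
            simp at this
            simpa [this] using hc
        rw [pvRuns, if_neg hc, ih]
        conv_rhs => rw [show (c :: rest) = (c :: rest.takeWhile (· == c)) ++ rest.dropWhile (· == c) by
          simp [hsplit.symm]]
        rw [goA_non_bs_run _ hrunne]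

-- ===== VERDICT (by name: the statement is the Claim_ definition above) =====
theorem remove_double_slashes_spec : Claim_equal_remove_double_slashes := by
  intro path _
  unfold Spec_remove_double_slashes remove_double_slashes remove_double_slashes_alt
  rw [foldA_eq, pvRuns_eq_goA]
  simp
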